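-- pv_equiv track=rewrite | github.com/Nosfer-Projects/Python-exercises | levenshtein distance/lev_dis2.py | lev
-- ===== SOURCE A (Python) =====
-- def lev(a, b):
--
--     if len(b) == 0:
--         return len(a)
--
--     if len(a) == 0:
--         return len(b)
--
--     if a[0] == b[0]:
--         return lev(a[1:], b[1:])
--
--     residual = 1 + min(lev(a[1:], b), lev(a, b[1:]), lev(a[1:], b[1:]))
--
--     return residual
-- ===== SOURCE B (Python) =====
-- def lev(a, b):
--     n, m = len(a), len(b)
--     # prev[j] = distance between "" and b[j:]  (= m - j)
--     prev = list(range(m, -1, -1))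
--     for i in range(n - 1, -1, -1):
--         cur = [0] * (m + 1)
--         cur[m] = n - i
--         for j in range(m - 1, -1, -1):
--             if a[i] == b[j]:
--                 cur[j] = prev[j + 1]
--             else:
--                 cur[j] = 1 + min(prev[j], cur[j + 1], prev[j + 1])
--         prev = cur
--     return prev[0]
-- ===== Notes on version B (the rewrite author's own statement) =====
-- stated objective: faster
-- what changed: Replaced the triple-branch exponential recursion on suffixes with an iterative Wagner-Fischer dynamic-programming table built row by row over suffixes, keeping only the previous row.
import Mathlib
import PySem

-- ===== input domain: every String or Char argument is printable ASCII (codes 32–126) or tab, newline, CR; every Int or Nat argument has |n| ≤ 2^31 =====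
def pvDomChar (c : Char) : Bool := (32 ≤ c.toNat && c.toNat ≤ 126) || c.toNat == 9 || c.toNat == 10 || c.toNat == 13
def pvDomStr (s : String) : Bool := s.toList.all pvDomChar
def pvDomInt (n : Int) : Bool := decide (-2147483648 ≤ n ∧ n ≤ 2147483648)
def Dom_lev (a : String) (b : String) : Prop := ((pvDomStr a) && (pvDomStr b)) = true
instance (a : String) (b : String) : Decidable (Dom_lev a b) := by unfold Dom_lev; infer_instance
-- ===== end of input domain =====

-- B replaces A's exponential triple recursion by an iterative Wagner-Fischer DP over suffixes (objective: faster).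

-- ===== PORT A =====
-- A's recursion on the character lists of the two strings, step for step.
def levL : List Char → List Char → Int
  | a, [] => (a.length : Int)                  -- if len(b) == 0: return len(a)
  | [], _ :: bs => ((bs.length + 1 : Nat) : Int)  -- if len(a) == 0: return len(b)
  | x :: as, y :: bs =>
      if x = y then levL as bs                 -- lev(a[1:], b[1:])
      else 1 + min (min (levL as (y :: bs)) (levL (x :: as) bs)) (levL as bs)
termination_by a b => a.length + b.length
decreasing_by all_goals (simp_all; try omega)

def lev (a : String) (b : String) : Int := levL a.toList b.toList

-- ===== PORT B =====
-- baseRow b = B's initial row: [m, m-1, ..., 0] (distance of "" to each suffix of b)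
def baseRow : List Char → List Int
  | [] => [0]
  | _ :: bs => ((bs.length + 1 : Nat) : Int) :: baseRow bs

-- stepRow x bsuffix prev: B's inner loop, building cur back-to-front from prev
def stepRow (x : Char) : List Char → List Int → List Int
  | [], prev => [(prev.headD 0) + 1]           -- cur[m] = n - i  (= prev[m] + 1)
  | y :: bs, prev =>
      let rest := stepRow x bs prev.tail
      (if x = y then prev.tail.headD 0
       else 1 + min (min (prev.headD 0) (rest.headD 0)) (prev.tail.headD 0)) :: rest

-- rows for i = n down to 0 (B's outer loop)
def levRows : List Char → List Char → List Int
  | [], b => baseRow b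
  | x :: as, b => stepRow x b (levRows as b)

def lev_alt (a : String) (b : String) : Int := (levRows a.toList b.toList).headD 0

-- ===== PRECONDITION & SPEC =====
def Spec_lev (a : String) (b : String) (out : Int) : Prop := out = lev_alt a b
instance (a : String) (b : String) (out : Int) : Decidable (Spec_lev a b out) := by unfold Spec_lev; infer_instance

-- ===== CLAIM (what is proved, stated in full; the proofs are below) =====
def Claim_equal_lev : Prop := ∀ (a : String) (b : String), Dom_lev a b → Spec_lev a b (lev a b)

-- ===== LEMMAS AND PROOFS =====

-- the intended contents of a row: distances of a to every suffix of b
def rowSpec (a : List Char) : List Char → List Int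
  | [] => [levL a []]
  | y :: bs => levL a (y :: bs) :: rowSpec a bs

theorem rowSpec_headD (a b : List Char) : (rowSpec a b).headD 0 = levL a b := by
  cases b <;> rfl

theorem rowSpec_tail (a : List Char) (y : Char) (bs : List Char) :
    (rowSpec a (y :: bs)).tail = rowSpec a bs := rfl

theorem levL_nil_right (a : List Char) : levL a [] = (a.length : Int) := by
  cases a <;> simp [levL]

theorem baseRow_eq (b : List Char) : baseRow b = rowSpec [] b := by
  induction b with
  | nil => simp [baseRow, rowSpec, levL]
  | cons y bs ih => simp [baseRow, rowSpec, ih, levL]; try push_cast; try ring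

theorem stepRow_eq (x : Char) (as : List Char) (b : List Char) :
    stepRow x b (rowSpec as b) = rowSpec (x :: as) b := by
  induction b with
  | nil =>
      simp [stepRow, rowSpec, levL_nil_right]
  | cons y bs ih =>
      simp only [stepRow, rowSpec_tail, ih]
      simp only [rowSpec, rowSpec_headD]
      rw [levL]
      simp

theorem levRows_eq (a b : List Char) : levRows a b = rowSpec a b := by
  induction a with
  | nil => exact baseRow_eq b
  | cons x as ih => simp [levRows, ih, stepRow_eq]

-- ===== VERDICT (by name: the statement is the Claim_ definition above) =====
theorem lev_spec : Claim_equal_lev := by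
  intro a b _
  unfold Spec_lev lev lev_alt
  rw [levRows_eq, rowSpec_headD]
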